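-- pv_equiv track=rewrite | github.com/kaavish-ki-kavish/mini_app | polls/utils.py | get_whole_stroke
-- ===== SOURCE A (Python) =====
-- def get_whole_stroke(drawing):
--     whole_x = []
--     whole_y = []
--     penup = set()  # points at which there is a penup
--     for stroke in drawing:
--         for x, y in stroke:
--             whole_x += [x]
--             whole_y += [y]
--         penup.add(len(whole_x))  # appending the index for penup
--
--     return whole_x, whole_y, penup
-- ===== SOURCE B (Python) =====
-- def get_whole_stroke(drawing):
--     # Structural recursion: solve the tail, then prepend the head stroke and
--     # shift the tail's penup indices by the head's length.
--     if not drawing: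
--         return [], [], set()
--     head, rest = drawing[0], drawing[1:]
--     xs, ys, pen = get_whole_stroke(rest)
--     n = len(head)
--     return ([p[0] for p in head] + xs,
--             [p[1] for p in head] + ys,
--             {n} | {n + k for k in pen})
-- ===== Notes on version B (the rewrite author's own statement) =====
-- stated objective: alternative
-- what changed: Replaces A's single imperative loop that grows whole_x/whole_y point-by-point and records len(whole_x) with a structural recursion on the stroke list: solve the tail first, prepend the head stroke's coordinates, and obtain penup by shifting the tail's recursively computed penup indices by the head's length instead of tracking any running index.
import Mathlib
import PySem

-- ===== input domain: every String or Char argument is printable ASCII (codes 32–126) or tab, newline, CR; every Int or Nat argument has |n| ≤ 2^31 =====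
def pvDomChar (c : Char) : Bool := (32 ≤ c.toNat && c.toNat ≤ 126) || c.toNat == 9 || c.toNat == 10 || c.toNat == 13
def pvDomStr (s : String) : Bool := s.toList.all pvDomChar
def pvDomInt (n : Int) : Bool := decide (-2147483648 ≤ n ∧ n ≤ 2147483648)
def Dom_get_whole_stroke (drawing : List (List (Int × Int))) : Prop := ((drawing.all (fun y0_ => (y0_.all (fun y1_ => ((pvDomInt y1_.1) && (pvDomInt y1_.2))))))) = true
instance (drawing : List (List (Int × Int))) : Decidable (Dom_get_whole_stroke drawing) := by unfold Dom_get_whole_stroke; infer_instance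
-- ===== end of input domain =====

-- B replaces A's imperative index-tracking loop with a structural recursion on the stroke
-- list that shifts the tail's penup indices by the head's length (objective: alternative).

-- ===== PORT A =====
-- A: one loop over strokes appending each point's x and y, recording len(whole_x) after each stroke.
def get_whole_stroke (drawing : List (List (Int × Int))) : List Int × List Int × List Int :=
  let st := drawing.foldl
    (fun (st : List Int × List Int × List Int) stroke =>
      let inner := stroke.foldl
        (fun (p : List Int × List Int) xy => (p.1 ++ [xy.1], p.2 ++ [xy.2]))
        (st.1, st.2.1)
      (inner.1, inner.2, PySem.Set.add st.2.2 (inner.1.length : Int)))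
    ([], [], [])
  (st.1, st.2.1, st.2.2)

-- ===== PORT B =====
-- B: recursion on the stroke list; penup = {n} | {n + k for k in pen-of-tail}.
def get_whole_stroke_alt : List (List (Int × Int)) → List Int × List Int × List Int
  | [] => ([], [], PySem.Set.empty)
  | head :: rest =>
    let r := get_whole_stroke_alt rest
    let n : Int := head.length
    (head.map (fun p => p.1) ++ r.1,
     head.map (fun p => p.2) ++ r.2.1,
     PySem.Set.union (PySem.Set.ofList [n]) (r.2.2.map (fun k => n + k)))

-- ===== PRECONDITION & SPEC =====
def Spec_get_whole_stroke (drawing : List (List (Int × Int))) (out : List Int × List Int × List Int) : Prop := out = get_whole_stroke_alt drawing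
instance (drawing : List (List (Int × Int))) (out : List Int × List Int × List Int) : Decidable (Spec_get_whole_stroke drawing out) := by unfold Spec_get_whole_stroke; infer_instance

-- ===== CLAIM (what is proved, stated in full; the proofs are below) =====
def Claim_equal_get_whole_stroke : Prop := ∀ (drawing : List (List (Int × Int))), Dom_get_whole_stroke drawing → Spec_get_whole_stroke drawing (get_whole_stroke drawing)

-- ===== LEMMAS AND PROOFS =====

-- cumulative stroke lengths starting from running total t
def pvCum (l : List (List (Int × Int))) (t : Int) : List Int :=
  match l with
  | [] => []
  | s :: rest => (t + (s.length : Int)) :: pvCum rest (t + (s.length : Int))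

lemma pvCum_shift (l : List (List (Int × Int))) : ∀ t : Int,
    pvCum l t = (pvCum l 0).map (fun k => t + k) := by
  induction l with
  | nil => intro t; simp [pvCum]
  | cons s rest ih =>
    intro t
    simp only [pvCum, zero_add, List.map_cons, ih (t + (s.length : Int)),
      ih ((s.length : Int)), List.map_map]
    refine congrArg₂ _ (by ring) ?_
    apply List.map_congr_left
    intro k _
    simp [Function.comp]
    ring

lemma inner_fold (stroke : List (Int × Int)) : ∀ (wx wy : List Int),
    stroke.foldl (fun (p : List Int × List Int) xy => (p.1 ++ [xy.1], p.2 ++ [xy.2])) (wx, wy)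
      = (wx ++ stroke.map (fun xy => xy.1), wy ++ stroke.map (fun xy => xy.2)) := by
  induction stroke with
  | nil => simp
  | cons p rest ih => intro wx wy; simp [List.foldl, ih]

def pvStep (st : List Int × List Int × List Int) (stroke : List (Int × Int)) :
    List Int × List Int × List Int :=
  let inner := stroke.foldl
    (fun (p : List Int × List Int) xy => (p.1 ++ [xy.1], p.2 ++ [xy.2]))
    (st.1, st.2.1)
  (inner.1, inner.2, PySem.Set.add st.2.2 (inner.1.length : Int))

lemma a_fold (l : List (List (Int × Int))) : ∀ (wx wy pen : List Int),
    l.foldl pvStep (wx, wy, pen)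
    = (wx ++ l.flatMap (fun s => s.map (fun xy => xy.1)),
       wy ++ l.flatMap (fun s => s.map (fun xy => xy.2)),
       PySem.Set.update pen (pvCum l (wx.length : Int))) := by
  induction l with
  | nil => intro wx wy pen; simp [PySem.Set.update, pvCum]
  | cons s rest ih =>
    intro wx wy pen
    have hstep : pvStep (wx, wy, pen) s
        = (wx ++ s.map (fun xy => xy.1), wy ++ s.map (fun xy => xy.2),
           PySem.Set.add pen ((wx.length : Int) + (s.length : Int))) := by
      simp [pvStep, inner_fold]
    rw [List.foldl_cons, hstep, ih]
    simp [pvCum, PySem.Set.update, List.flatMap_cons]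

-- elements of l not already in s, first occurrences, in order
def pvFirstOccs (s l : List Int) : List Int :=
  match l with
  | [] => []
  | x :: l => if x ∈ s then pvFirstOccs s l else x :: pvFirstOccs (s ++ [x]) l

lemma foldl_add_eq (l : List Int) : ∀ s : List Int,
    l.foldl PySem.Set.add s = s ++ pvFirstOccs s l := by
  induction l with
  | nil => intro s; simp [pvFirstOccs]
  | cons x l ih =>
    intro s
    by_cases h : x ∈ s
    · simp [PySem.Set.add, pvFirstOccs, h, ih]
    · simp [PySem.Set.add, pvFirstOccs, h, ih]

lemma firstOccs_dedup (m : List Int) : ∀ s t : List Int, (∀ x, x ∈ t → x ∈ s) →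
    pvFirstOccs s (pvFirstOccs t m) = pvFirstOccs s m := by
  induction m with
  | nil => intro s t _; simp [pvFirstOccs]
  | cons x m ih =>
    intro s t hts
    by_cases hxt : x ∈ t
    · simp [pvFirstOccs, hxt, hts x hxt, ih s t hts]
    · by_cases hxs : x ∈ s
      · have hsub : ∀ y, y ∈ t ++ [x] → y ∈ s := by
          intro y hy; rcases List.mem_append.mp hy with h | h
          · exact hts y h
          · simp at h; subst h; exact hxs
        simp [pvFirstOccs, hxt, hxs, ih s (t ++ [x]) hsub]
      · have hsub : ∀ y, y ∈ t ++ [x] → y ∈ s ++ [x] := by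
          intro y hy; rcases List.mem_append.mp hy with h | h
          · exact List.mem_append.mpr (Or.inl (hts y h))
          · exact List.mem_append.mpr (Or.inr h)
        simp [pvFirstOccs, hxt, hxs, ih (s ++ [x]) (t ++ [x]) hsub]

lemma firstOccs_map_shift (m : List Int) (n : Int) : ∀ s : List Int,
    (pvFirstOccs s m).map (fun k => n + k) = pvFirstOccs (s.map (fun k => n + k)) (m.map (fun k => n + k)) := by
  induction m with
  | nil => intro s; simp [pvFirstOccs]
  | cons x m ih =>
    intro s
    by_cases h : x ∈ s
    · have : n + x ∈ s.map (fun k => n + k) := List.mem_map.mpr ⟨x, h, rfl⟩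
      simp [pvFirstOccs, h, this, ih]
    · have : n + x ∉ s.map (fun k => n + k) := by
        intro hc; rcases List.mem_map.mp hc with ⟨y, hy, he⟩
        have : y = x := by omega
        exact h (this ▸ hy)
      simp [pvFirstOccs, h, this, ih]

lemma ofList_eq_firstOccs (l : List Int) : PySem.Set.ofList l = pvFirstOccs [] l := by
  rw [PySem.Set.ofList_eq_foldl, foldl_add_eq]; simp

-- B's result, characterised: flattened coordinates and penup = set of cumulative lengths
lemma b_char (l : List (List (Int × Int))) :
    get_whole_stroke_alt l
      = (l.flatMap (fun s => s.map (fun xy => xy.1)),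
         l.flatMap (fun s => s.map (fun xy => xy.2)),
         PySem.Set.ofList (pvCum l 0)) := by
  induction l with
  | nil => simp [get_whole_stroke_alt, pvCum, PySem.Set.empty, PySem.Set.ofList]
  | cons head rest ih =>
    have hn : pvCum (head :: rest) 0
        = (head.length : Int) :: (pvCum rest 0).map (fun k => (head.length : Int) + k) := by
      simp only [pvCum, zero_add]
      rw [pvCum_shift]
    rw [get_whole_stroke_alt]
    simp only [ih, List.flatMap_cons, Prod.mk.injEq]
    refine ⟨trivial, trivial, ?_⟩
    rw [hn]
    have hofl : PySem.Set.ofList ((head.length : Int)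
        :: (pvCum rest 0).map (fun k => (head.length : Int) + k))
        = ((pvCum rest 0).map (fun k => (head.length : Int) + k)).foldl PySem.Set.add
            [(head.length : Int)] := by
      rw [PySem.Set.ofList_eq_foldl, List.foldl_cons]
      rfl
    rw [hofl, PySem.Set.union, PySem.Set.update,
        ofList_eq_firstOccs (pvCum rest 0), firstOccs_map_shift,
        foldl_add_eq, foldl_add_eq]
    rw [show PySem.Set.ofList [(head.length : Int)] = [(head.length : Int)] from rfl]
    simp only [List.map_nil]
    congr 1
    exact firstOccs_dedup _ _ _ (by simp)

-- ===== VERDICT (by name: the statement is the Claim_ definition above) =====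
theorem get_whole_stroke_spec : Claim_equal_get_whole_stroke := by
  intro drawing _
  unfold Spec_get_whole_stroke get_whole_stroke
  rw [show (fun (st : List Int × List Int × List Int) stroke =>
      let inner := stroke.foldl
        (fun (p : List Int × List Int) xy => (p.1 ++ [xy.1], p.2 ++ [xy.2]))
        (st.1, st.2.1)
      (inner.1, inner.2, PySem.Set.add st.2.2 (inner.1.length : Int))) = pvStep from rfl]
  rw [a_fold, b_char]
  simp [PySem.Set.update, foldl_add_eq, ofList_eq_firstOccs]
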